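-- pv_equiv track=rewrite | github.com/james-db/Pre-Processor | character_detector/utils/utils.py | split_row
-- ===== SOURCE A (Python) =====
-- import copy
--
-- def split_row(coordinates: list) -> list:
--
--     new_coordinates: list = list()
--     coordinates_row: list = list()
--     x_pre: int = -1
--
--     while coordinates:
--
--         coor = coordinates.pop(0)
--         x_cur: int = coor[0]
--
--         if x_pre < x_cur:
--
--             coordinates_row.append(coor)
--             x_pre: int = x_cur
--
--         else:
--
--             coordinates.insert(0, coor)
--             new_coordinates.append(copy.deepcopy(coordinates_row))
--             coordinates_row.clear()
--             x_pre: int = -1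
--
--     if coordinates_row:
--
--         new_coordinates.append(coordinates_row)
--
--     return new_coordinates
-- ===== SOURCE B (Python) =====
-- def split_row(coordinates: list) -> list:
--     new_coordinates = []
--     row = []
--     for coor in coordinates:
--         if row and row[-1][0] >= coor[0]:
--             new_coordinates.append(row)
--             row = [coor]
--         else:
--             row.append(coor)
--     if row:
--         new_coordinates.append(row)
--     return new_coordinates
-- ===== Notes on version B (the rewrite author's own statement) =====
-- stated objective: faster
-- what changed: One forward for-pass that flushes the current run when the previous x is not smaller, instead of A's while loop with pop(0)/insert(0) re-queuing and deepcopy of every finished row; Pre_ excludes inputs on which A never returns: an element that is an empty list (IndexError) or a first coordinate <= -1 (A loops forever re-inserting it).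
import Mathlib
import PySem

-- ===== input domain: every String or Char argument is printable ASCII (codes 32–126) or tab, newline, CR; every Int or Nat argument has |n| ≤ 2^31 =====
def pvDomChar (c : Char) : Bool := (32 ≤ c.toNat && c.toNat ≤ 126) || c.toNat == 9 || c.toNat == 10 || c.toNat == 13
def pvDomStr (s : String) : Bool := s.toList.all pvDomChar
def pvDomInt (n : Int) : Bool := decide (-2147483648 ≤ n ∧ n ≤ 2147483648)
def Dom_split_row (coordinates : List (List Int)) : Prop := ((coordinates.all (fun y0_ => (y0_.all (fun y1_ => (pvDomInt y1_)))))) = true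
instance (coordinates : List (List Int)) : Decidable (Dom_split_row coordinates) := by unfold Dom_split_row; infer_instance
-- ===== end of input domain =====

-- B replaces A's pop(0)/insert(0) re-queuing loop with deepcopy by a single forward pass
-- flushing the current run when x stops increasing (objective: faster). A drains its input
-- list in place; B does not mutate it — the equivalence proved is about the return value.

-- ===== PORT A =====
-- A's while loop: pop the head; if x_pre < x it joins the row, otherwise it is re-inserted,
-- the row is flushed and x_pre reset to -1.  The loop does not terminate when a first
-- coordinate ≤ -1 is reached (excluded by Pre_), so the port carries fuel 2*len+1, which
-- is enough for every input Pre_ admits; coor[0] (IndexError on []) is coor.headD 0 here,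
-- exact since Pre_ excludes empty elements.
def splitA_go : Nat → List (List Int) → List (List (List Int)) → List (List Int) → Int → List (List (List Int))
  | 0, _, newc, row, _ => if row.isEmpty then newc else newc ++ [row]
  | fuel+1, coords, newc, row, xpre =>
    match coords with
    | [] => if row.isEmpty then newc else newc ++ [row]
    | coor :: rest =>
      let xcur : Int := coor.headD 0
      if xpre < xcur then
        splitA_go fuel rest newc (row ++ [coor]) xcur
      else
        splitA_go fuel (coor :: rest) (newc ++ [row]) [] (-1)

def split_row (coordinates : List (List Int)) : List (List (List Int)) :=
  splitA_go (2 * coordinates.length + 1) coordinates [] [] (-1)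

-- ===== PORT B =====
-- one fold over the input; state = (finished rows, current row); row[-1][0] is
-- (row.getLastD []).headD 0 (exact: only read when row is nonempty / inside Pre_)
def splitB_step (st : List (List (List Int)) × List (List Int)) (coor : List Int) :
    List (List (List Int)) × List (List Int) :=
  if !st.2.isEmpty && decide ((st.2.getLastD []).headD 0 ≥ coor.headD 0) then
    (st.1 ++ [st.2], [coor])
  else
    (st.1, st.2 ++ [coor])

def split_row_alt (coordinates : List (List Int)) : List (List (List Int)) :=
  let st := coordinates.foldl splitB_step ([], [])
  if st.2.isEmpty then st.1 else st.1 ++ [st.2]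

-- ===== PRECONDITION & SPEC =====
-- Pre_ excludes exactly the inputs on which A never returns: an empty element (coor[0]
-- raises IndexError) or a first coordinate ≤ -1 (A re-inserts it forever and diverges).
def Pre_split_row (coordinates : List (List Int)) : Prop :=
  ∀ c ∈ coordinates, c ≠ [] ∧ 0 ≤ c.headD 0
instance (coordinates : List (List Int)) : Decidable (Pre_split_row coordinates) := by
  unfold Pre_split_row; infer_instance

def pvWitness_split_row : List (List Int) := [[1, 2], [3], [2], [2], [5], [0]]

def Spec_split_row (coordinates : List (List Int)) (out : List (List (List Int))) : Prop := out = split_row_alt coordinates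
instance (coordinates : List (List Int)) (out : List (List (List Int))) : Decidable (Spec_split_row coordinates out) := by unfold Spec_split_row; infer_instance

-- ===== CLAIM (what is proved, stated in full; the proofs are below) =====
def Claim_equal_split_row : Prop := ∀ (coordinates : List (List Int)), Dom_split_row coordinates → Pre_split_row coordinates → Spec_split_row coordinates (split_row coordinates)

-- ===== LEMMAS AND PROOFS =====

-- A's loop state satisfies: row empty with x_pre = -1, or x_pre is the first coordinate
-- of the last row element.
def pvInv (row : List (List Int)) (xpre : Int) : Prop :=
  (row = [] ∧ xpre = -1) ∨ (row ≠ [] ∧ xpre = (row.getLastD []).headD 0)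

lemma go_eq (coords : List (List Int)) :
    ∀ (newc : List (List (List Int))) (row : List (List Int)) (xpre : Int) (fuel : Nat),
    (∀ c ∈ coords, 0 ≤ c.headD 0) →
    pvInv row xpre →
    2 * coords.length + 1 ≤ fuel →
    splitA_go fuel coords newc row xpre =
      (let st := coords.foldl splitB_step (newc, row)
       if st.2.isEmpty then st.1 else st.1 ++ [st.2]) := by
  induction coords with
  | nil =>
    intro newc row xpre fuel _ _ hfuel
    obtain ⟨k, rfl⟩ : ∃ k, fuel = k + 1 := ⟨fuel - 1, by omega⟩
    simp [splitA_go]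
  | cons coor rest ih =>
    intro newc row xpre fuel hpos hinv hfuel
    obtain ⟨k, rfl⟩ : ∃ k, fuel = k + 1 := ⟨fuel - 1, by omega⟩
    have hx : (0 : Int) ≤ coor.headD 0 := hpos coor (by simp)
    have hrest : ∀ c ∈ rest, (0 : Int) ≤ c.headD 0 := fun c hc => hpos c (by simp [hc])
    simp only [splitA_go]
    by_cases hlt : xpre < coor.headD 0
    · -- append branch of A; B's step keeps extending the row
      rw [if_pos hlt]
      have hstep : splitB_step (newc, row) coor = (newc, row ++ [coor]) := by
        rcases hinv with ⟨hr, _⟩ | ⟨hr, hx0⟩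
        · simp [splitB_step, hr]
        · simp only [List.getLastD_eq_getLast?, List.headD_eq_head?] at hx0 hlt
          simp [splitB_step, hr]
          omega
      rw [List.foldl_cons, hstep]
      exact ih newc (row ++ [coor]) (coor.headD 0) k hrest
        (Or.inr ⟨by simp, by simp⟩) (by simp at hfuel ⊢; omega)
    · -- flush branch of A: row is nonempty, flush then re-examine coor (now appended)
      rw [if_neg hlt]
      have hrne : row ≠ [] := by
        rcases hinv with ⟨hr, hx0⟩ | ⟨hr, _⟩
        · exfalso; subst hx0; omega
        · exact hr
      have hx0 : xpre = (row.getLastD []).headD 0 := by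
        rcases hinv with ⟨hr, _⟩ | ⟨_, h⟩
        · exact absurd hr hrne
        · exact h
      obtain ⟨k', rfl⟩ : ∃ k', k = k' + 1 := ⟨k - 1, by simp at hfuel; omega⟩
      simp only [splitA_go]
      rw [if_pos (by omega : (-1 : Int) < coor.headD 0)]
      have hstep : splitB_step (newc, row) coor = (newc ++ [row], [coor]) := by
        simp only [List.getLastD_eq_getLast?, List.headD_eq_head?] at hx0 hlt
        simp [splitB_step, hrne]
        omega
      rw [List.foldl_cons, hstep]
      exact ih (newc ++ [row]) [coor] (coor.headD 0) k' hrest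
        (Or.inr ⟨by simp, by simp⟩) (by simp at hfuel ⊢; omega)

-- ===== VERDICT (by name: the statement is the Claim_ definition above) =====
theorem split_row_spec : Claim_equal_split_row := by
  intro coords _ hpre
  show split_row coords = split_row_alt coords
  unfold split_row split_row_alt
  exact go_eq coords [] [] (-1) (2 * coords.length + 1)
    (fun c hc => (hpre c hc).2) (Or.inl ⟨rfl, rfl⟩) (by omega)
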